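-- pv_equiv track=rewrite | github.com/VT69/Udyam-Setu | backend/app/services/entity_resolution/blocking.py | _block_anchor
-- ===== SOURCE A (Python) =====
-- from collections import defaultdict
-- from itertools import combinations
--
-- def _block_anchor(records: list[dict]) -> set[tuple]:
--     """Exact match on valid PAN or GSTIN."""
--     pairs = set()
--
--     pan_map = defaultdict(list)
--     gstin_map = defaultdict(list)
--
--     for r in records:
--         if r.get("pan"):
--             pan_map[r["pan"]].append(r["id"])
--         if r.get("gstin"):
--             gstin_map[r["gstin"]].append(r["id"])
--
--     for ids in pan_map.values():
--         if len(ids) > 1: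
--             pairs.update(combinations(ids, 2))
--
--     for ids in gstin_map.values():
--         if len(ids) > 1:
--             pairs.update(combinations(ids, 2))
--
--     return pairs
-- ===== SOURCE B (Python) =====
-- def _block_anchor(records: list[dict]) -> set[tuple]:
--     """Exact match on valid PAN or GSTIN, without intermediate id-list maps:
--     per field, collect the distinct truthy values in first-occurrence order,
--     then rescan the records for each value and emit its id pairs directly."""
--     pairs = set()
--     for field in ("pan", "gstin"):
--         seen = []
--         for r in records:
--             v = r.get(field)
--             if v and v not in seen:
--                 seen.append(v)
--         for v in seen:
--             group = [r["id"] for r in records if r.get(field) == v]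
--             while group:
--                 x = group.pop(0)
--                 for y in group:
--                     pairs.add((x, y))
--     return pairs
-- ===== Notes on version B (the rewrite author's own statement) =====
-- stated objective: alternative
-- what changed: Replaces the single-pass defaultdict(list) pan/gstin maps plus itertools.combinations with a per-field rescan: collect the distinct truthy values in first-occurrence order, then for each value re-filter the records for its id group and emit the pairs with an explicit pop/inner loop (no dicts, no itertools).
import Mathlib
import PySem

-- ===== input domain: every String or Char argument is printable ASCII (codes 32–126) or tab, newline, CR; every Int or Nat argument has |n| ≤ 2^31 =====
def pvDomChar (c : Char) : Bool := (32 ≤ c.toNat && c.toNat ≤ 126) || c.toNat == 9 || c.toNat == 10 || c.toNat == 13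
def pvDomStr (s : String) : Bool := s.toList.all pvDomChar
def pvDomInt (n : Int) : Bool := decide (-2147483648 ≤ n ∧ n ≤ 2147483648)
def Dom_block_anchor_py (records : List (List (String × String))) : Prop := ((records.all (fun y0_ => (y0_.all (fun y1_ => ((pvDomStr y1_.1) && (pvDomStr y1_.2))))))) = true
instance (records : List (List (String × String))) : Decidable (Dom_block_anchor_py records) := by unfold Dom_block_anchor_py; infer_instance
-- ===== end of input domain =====

-- B replaces the pan_map/gstin_map index-then-combinations pipeline by a per-field rescan:
-- distinct truthy values in first-occurrence order, then the id group of each value is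
-- recollected from the records and its pairs emitted directly (objective: alternative).

-- ===== PORT A =====
-- r.get(k) on the record dict (first-match association-list lookup)
def pvGet (r : List (String × String)) (k : String) : Option String :=
  (PySem.Dict.mk r).get? k

-- the record's value at k, with "" for a missing key; under the truthiness guard
-- (value ≠ "") this is exactly Python's r[k] / a truthy r.get(k)
def pvVal (r : List (String × String)) (k : String) : String :=
  (pvGet r k).getD ""

-- Python truthiness of r.get(k): present and non-empty
def pvTruthy (r : List (String × String)) (k : String) : Bool :=
  pvVal r k ≠ ""

-- hand port of list(itertools.combinations(ids, 2)) as pairs, CPython's order (exact)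
def pvCombos2 {α : Type} : List α → List (α × α)
  | [] => []
  | x :: xs => xs.map (fun y => (x, y)) ++ pvCombos2 xs

-- one record's effect on one of the defaultdict(list) maps: map[r[f]].append(r["id"])
-- (r["id"] is pvVal r "id"; Pre_ guarantees the key is present where this runs)
def pvStepA (f : String) (d : PySem.Dict String (List String)) (r : List (String × String)) :
    PySem.Dict String (List String) :=
  if pvTruthy r f then d.modify (pvVal r f) [] (· ++ [pvVal r "id"]) else d

-- 'if len(ids) > 1: pairs.update(combinations(ids, 2))'
def pvEmitA (s : PySem.Set (String × String)) (ids : List String) : PySem.Set (String × String) :=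
  if 1 < ids.length then (pvCombos2 ids).foldl PySem.Set.add s else s

def block_anchor_py (records : List (List (String × String))) : List (String × String) :=
  let maps := records.foldl
    (fun pg r => (pvStepA "pan" pg.1 r, pvStepA "gstin" pg.2 r))
    ((PySem.Dict.empty : PySem.Dict String (List String)),
     (PySem.Dict.empty : PySem.Dict String (List String)))
  let pairs : PySem.Set (String × String) := PySem.Set.empty
  let pairs := maps.1.values.foldl pvEmitA pairs
  maps.2.values.foldl pvEmitA pairs

-- ===== PORT B =====
-- 'while group: x = group.pop(0); for y in group: pairs.add((x, y))'
def pvPopLoop (s : PySem.Set (String × String)) : List String → PySem.Set (String × String)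
  | [] => s
  | x :: rest => pvPopLoop (rest.foldl (fun s y => PySem.Set.add s (x, y)) s) rest

-- 'seen': the distinct truthy values of field f, in first-occurrence order
def pvSeen (records : List (List (String × String))) (f : String) : List String :=
  records.foldl
    (fun s r => let v := pvVal r f; if v ≠ "" ∧ v ∉ s then s ++ [v] else s) []

-- '[r["id"] for r in records if r.get(f) == v]'
def pvGroup (records : List (List (String × String))) (f : String) (v : String) : List String :=
  (records.filter (fun r => pvGet r f == some v)).map (fun r => pvVal r "id")

def block_anchor_py_alt (records : List (List (String × String))) : List (String × String) :=
  ["pan", "gstin"].foldl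
    (fun pairs f =>
      (pvSeen records f).foldl (fun pairs v => pvPopLoop pairs (pvGroup records f v)) pairs)
    (PySem.Set.empty : PySem.Set (String × String))

-- ===== PRECONDITION & SPEC =====
-- Pre_ excludes exactly the records with a truthy "pan" or "gstin" but no "id" key,
-- where the Python A (and B alike) raises KeyError on r["id"].
def Pre_block_anchor_py (records : List (List (String × String))) : Prop :=
  ∀ r ∈ records, (pvTruthy r "pan" = true ∨ pvTruthy r "gstin" = true) →
    (PySem.Dict.mk r).contains "id" = true
instance (records : List (List (String × String))) : Decidable (Pre_block_anchor_py records) := by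
  unfold Pre_block_anchor_py; infer_instance

def pvWitness_block_anchor_py : (List (List (String × String))) :=
  [[("id", "1"), ("pan", "P")], [("id", "2"), ("pan", "P"), ("gstin", "G")], [("id", "3"), ("gstin", "G")]]

def Spec_block_anchor_py (records : List (List (String × String))) (out : List (String × String)) : Prop := out = block_anchor_py_alt records
instance (records : List (List (String × String))) (out : List (String × String)) : Decidable (Spec_block_anchor_py records out) := by unfold Spec_block_anchor_py; infer_instance

-- ===== CLAIM (what is proved, stated in full; the proofs are below) =====
def Claim_equal_block_anchor_py : Prop := ∀ (records : List (List (String × String))), Dom_block_anchor_py records → Pre_block_anchor_py records → Spec_block_anchor_py records (block_anchor_py records)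

-- ===== LEMMAS AND PROOFS =====

-- the field-f map A builds, as a standalone fold
def pvMapA (records : List (List (String × String))) (f : String) : PySem.Dict String (List String) :=
  records.foldl (pvStepA f) PySem.Dict.empty

-- the records whose field f is truthy
def pvFiltered (records : List (List (String × String))) (f : String) : List (List (String × String)) :=
  records.filter (fun r => pvTruthy r f)

lemma pvMapA_eq_filtered (records : List (List (String × String))) (f : String) :
    pvMapA records f
      = (pvFiltered records f).foldl
          (fun d r => d.modify (pvVal r f) [] (· ++ [pvVal r "id"])) PySem.Dict.empty := by
  unfold pvMapA pvFiltered
  rw [List.foldl_filter]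
  rfl

lemma pvMapA_keys (records : List (List (String × String))) (f : String) :
    (pvMapA records f).keys = PySem.Set.ofList ((pvFiltered records f).map (fun r => pvVal r f)) := by
  rw [pvMapA_eq_filtered,
    PySem.Dict.keys_foldl_modify_key (pvFiltered records f) (fun r => pvVal r f) []
      (fun _ r => (· ++ [pvVal r "id"])) PySem.Dict.empty]
  rw [PySem.Set.ofList_eq_foldl]
  rfl

lemma pvMapA_nodup_keys (records : List (List (String × String))) (f : String) :
    (pvMapA records f).keys.Nodup := by
  rw [pvMapA_eq_filtered]
  exact PySem.Dict.nodup_keys_foldl_modify_key (pvFiltered records f) (fun r => pvVal r f) []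
    (fun _ r => (· ++ [pvVal r "id"])) PySem.Dict.empty PySem.Dict.nodup_keys_empty

lemma pvMapA_getD (records : List (List (String × String))) (f v : String) :
    (pvMapA records f).getD v []
      = ((pvFiltered records f).filter (fun r => pvVal r f == v)).map (fun r => pvVal r "id") := by
  rw [pvMapA_eq_filtered]
  have h := PySem.Dict.getD_foldl_modify_append
    ((pvFiltered records f).map (fun r => (pvVal r f, pvVal r "id"))) PySem.Dict.empty v
  rw [List.foldl_map] at h
  simp only [List.filter_map, List.map_map] at h
  simpa using h

-- B's seen list is exactly the keys of A's map
lemma pvSeen_eq_keys (records : List (List (String × String))) (f : String) :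
    pvSeen records f = (pvMapA records f).keys := by
  rw [pvMapA_keys]
  unfold pvSeen
  have hstep : ∀ (s : List String) (r : List (String × String)),
      (let v := pvVal r f; if v ≠ "" ∧ v ∉ s then s ++ [v] else s)
        = if pvTruthy r f then PySem.Set.add s (pvVal r f) else s := by
    intro s r
    by_cases hv : pvVal r f = ""
    · simp [pvTruthy, hv]
    · by_cases hm : pvVal r f ∈ s
      · simp [pvTruthy, hv, hm, PySem.Set.add_of_mem]
      · simp [pvTruthy, hv, hm, PySem.Set.add_of_not_mem]
  calc records.foldl (fun s r => let v := pvVal r f; if v ≠ "" ∧ v ∉ s then s ++ [v] else s) []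
      = records.foldl (fun s r => if pvTruthy r f then PySem.Set.add s (pvVal r f) else s) [] := by
        exact PySem.List.foldl_congr_mem records _ _ [] (fun s r _ => hstep s r)
    _ = (pvFiltered records f).foldl (fun s r => PySem.Set.add s (pvVal r f)) [] := by
        unfold pvFiltered; rw [List.foldl_filter]
    _ = PySem.Set.ofList ((pvFiltered records f).map (fun r => pvVal r f)) := by
        rw [PySem.Set.ofList_eq_foldl, List.foldl_map]

-- B's rescanned group equals A's stored id list, for a truthy value v
lemma pvGroup_eq_getD (records : List (List (String × String))) (f v : String) (hv : v ≠ "") :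
    pvGroup records f v = (pvMapA records f).getD v [] := by
  rw [pvMapA_getD]
  unfold pvGroup pvFiltered
  rw [List.filter_filter]
  congr 1
  apply List.filter_congr
  intro r _
  cases h : pvGet r f with
  | none => simp [pvTruthy, pvVal, h]
  | some w =>
    by_cases hw : w = v
    · subst hw; simp [pvTruthy, pvVal, h, hv]
    · simp [pvTruthy, pvVal, h, hw]

-- A's combinations-update equals B's pop loop
lemma pvCombos2_foldl (ids : List String) (s : PySem.Set (String × String)) :
    (pvCombos2 ids).foldl PySem.Set.add s = pvPopLoop s ids := by
  induction ids generalizing s with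
  | nil => rfl
  | cons x rest ih =>
    simp only [pvCombos2, pvPopLoop, List.foldl_append, List.foldl_map]
    exact ih _

lemma pvEmitA_eq_popLoop (s : PySem.Set (String × String)) (ids : List String) :
    pvEmitA s ids = pvPopLoop s ids := by
  unfold pvEmitA
  split_ifs with h
  · exact pvCombos2_foldl ids s
  · cases ids with
    | nil => rfl
    | cons x t =>
      cases t with
      | nil => rfl
      | cons y t' => simp [List.length_cons] at h

-- one field's whole phase: A's values/combinations fold equals B's seen/rescan fold
lemma pvPhase_eq (records : List (List (String × String))) (f : String)
    (s : PySem.Set (String × String)) :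
    (pvMapA records f).values.foldl pvEmitA s
      = (pvSeen records f).foldl (fun s v => pvPopLoop s (pvGroup records f v)) s := by
  rw [PySem.Dict.values_eq_map_keys (pvMapA records f) (pvMapA_nodup_keys records f) [],
    List.foldl_map, pvSeen_eq_keys]
  apply PySem.List.foldl_congr_mem
  intro acc v hv
  have hvne : v ≠ "" := by
    rw [pvMapA_keys] at hv
    rw [PySem.Set.mem_ofList] at hv
    obtain ⟨r, hr, hrv⟩ := List.mem_map.mp hv
    have := List.of_mem_filter hr
    simpa [pvTruthy, hrv] using this
  rw [pvEmitA_eq_popLoop, pvGroup_eq_getD records f v hvne]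

-- ===== VERDICT (by name: the statement is the Claim_ definition above) =====
theorem block_anchor_py_spec : Claim_equal_block_anchor_py := by
  intro records _ _
  unfold Spec_block_anchor_py block_anchor_py block_anchor_py_alt
  rw [PySem.List.foldl_prod_mk (pvStepA "pan") (pvStepA "gstin") records
    PySem.Dict.empty PySem.Dict.empty]
  simp only [List.foldl_cons, List.foldl_nil]
  rw [show records.foldl (pvStepA "pan") PySem.Dict.empty = pvMapA records "pan" from rfl,
    show records.foldl (pvStepA "gstin") PySem.Dict.empty = pvMapA records "gstin" from rfl,
    pvPhase_eq records "pan" PySem.Set.empty, pvPhase_eq records "gstin" _]
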